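-- pv_equiv track=rewrite | github.com/clayerAI/evovera | adversarial_test_runner.py | validate_tour
-- ===== SOURCE A (Python) =====
-- from typing import Dict, List, Tuple, Any, Optional
--
-- def validate_tour(tour: List[int], n_cities: int) -> bool:
--     """Validate that a tour is a valid permutation of cities."""
--     if not tour:
--         return False
--
--     if len(tour) != n_cities:
--         return False
--
--     # Check that all cities appear exactly once
--     seen = set()
--     for city in tour:
--         if not isinstance(city, int):
--             return False
--         if city < 0 or city >= n_cities:
--             return False
--         if city in seen:
--             return False
--         seen.add(city)
--
--     return len(seen) == n_cities
-- ===== SOURCE B (Python) =====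
-- def validate_tour(tour, n_cities):
--     if not tour:
--         return False
--     if len(tour) != n_cities:
--         return False
--     if not all(isinstance(c, int) for c in tour):
--         return False
--     return sorted(tour) == list(range(n_cities))
-- ===== Notes on version B (the rewrite author's own statement) =====
-- stated objective: simpler
-- what changed: Replaces the per-element seen-set membership loop (range check + duplicate check + final size check) with a single canonical comparison sorted(tour) == list(range(n_cities)) after the same emptiness/length/type guards.
import Mathlib
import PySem

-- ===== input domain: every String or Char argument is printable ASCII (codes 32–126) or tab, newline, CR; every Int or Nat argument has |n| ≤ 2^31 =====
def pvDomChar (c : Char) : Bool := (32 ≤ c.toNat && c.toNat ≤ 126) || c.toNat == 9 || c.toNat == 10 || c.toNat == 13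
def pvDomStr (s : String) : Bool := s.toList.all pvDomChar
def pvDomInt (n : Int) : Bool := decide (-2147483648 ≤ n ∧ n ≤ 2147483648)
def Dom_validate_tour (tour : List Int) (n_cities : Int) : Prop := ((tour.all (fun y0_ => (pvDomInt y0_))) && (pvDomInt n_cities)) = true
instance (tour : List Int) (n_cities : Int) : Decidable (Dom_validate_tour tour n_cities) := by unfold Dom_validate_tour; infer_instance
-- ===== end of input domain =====

-- B replaces A's per-element seen-set loop by one canonical comparison sorted(tour) == range(n_cities); simpler, same behaviour.

-- ===== PORT A =====
-- the for-loop over tour with its Python set `seen`; the `isinstance(city, int)` test is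
-- always true for a List Int argument, transliterated as an always-false early return guard omitted
def vtLoop (n : Int) : PySem.Set Int → List Int → Bool
  | seen, [] => decide ((seen.length : Int) = n)
  | seen, city :: rest =>
    if city < 0 || n ≤ city then false
    else if PySem.Set.contains seen city then false
    else vtLoop n (PySem.Set.add seen city) rest

def validate_tour (tour : List Int) (n_cities : Int) : Bool :=
  if tour = [] then false
  else if (tour.length : Int) ≠ n_cities then false
  else vtLoop n_cities PySem.Set.empty tour

-- ===== PORT B =====
def validate_tour_alt (tour : List Int) (n_cities : Int) : Bool :=
  if tour = [] then false
  else if (tour.length : Int) ≠ n_cities then false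
  else decide (PySem.List.sorted tour (fun x => x) false = PySem.List.pyRange 0 n_cities 1)

-- ===== PRECONDITION & SPEC =====
def Spec_validate_tour (tour : List Int) (n_cities : Int) (out : Bool) : Prop := out = validate_tour_alt tour n_cities
instance (tour : List Int) (n_cities : Int) (out : Bool) : Decidable (Spec_validate_tour tour n_cities out) := by unfold Spec_validate_tour; infer_instance

-- ===== CLAIM (what is proved, stated in full; the proofs are below) =====
def Claim_equal_validate_tour : Prop := ∀ (tour : List Int) (n_cities : Int), Dom_validate_tour tour n_cities → Spec_validate_tour tour n_cities (validate_tour tour n_cities)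

-- ===== LEMMAS AND PROOFS =====

-- Invariant of A's loop: it returns true iff the remaining cities are in range, pairwise
-- distinct and fresh w.r.t. `seen`, and the final set size equals n.
theorem vtLoop_true_iff (n : Int) (rest : List Int) : ∀ (seen : PySem.Set Int), seen.Nodup →
    (vtLoop n seen rest = true ↔
      (seen ++ rest).Nodup ∧ (∀ c ∈ rest, 0 ≤ c ∧ c < n) ∧ ((seen.length : Int) + rest.length = n)) := by
  induction rest with
  | nil =>
    intro seen hseen
    simp [vtLoop, hseen]
  | cons c rest ih =>
    intro seen hseen
    by_cases hr : (c < 0 || n ≤ c) = true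
    · rw [show vtLoop n seen (c :: rest) = false from by simp [vtLoop, hr]]
      simp only [Bool.or_eq_true, decide_eq_true_eq] at hr
      constructor
      · intro h; exact absurd h (by simp)
      · rintro ⟨-, hball, -⟩
        have := hball c (by simp)
        omega
    · have hb : 0 ≤ c ∧ c < n := by
        simp only [Bool.or_eq_true, decide_eq_true_eq, not_or] at hr; omega
      by_cases hmem : c ∈ seen
      · rw [show vtLoop n seen (c :: rest) = false from by simp [vtLoop, hr, hmem]]
        constructor
        · intro h; exact absurd h (by simp)
        · rintro ⟨hnd, -, -⟩
          rw [List.nodup_append] at hnd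
          exact absurd rfl (hnd.2.2 c hmem c (by simp))
      · have hadd : PySem.Set.add seen c = seen ++ [c] := by
          simp [PySem.Set.add, hmem]
        have hnodup' : (PySem.Set.add seen c).Nodup := by
          rw [hadd]
          exact hseen.append (List.nodup_singleton c)
            (by simpa [List.disjoint_singleton] using hmem)
        rw [show vtLoop n seen (c :: rest) = vtLoop n (PySem.Set.add seen c) rest from by
              simp [vtLoop, hr, hmem],
            ih _ hnodup', hadd, List.append_assoc, List.singleton_append]
        constructor
        · rintro ⟨hnd, hball, hlen⟩
          refine ⟨hnd, ?_, by simp at hlen ⊢; omega⟩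
          intro x hx
          rcases List.mem_cons.mp hx with h | h
          · subst h; exact hb
          · exact hball x h
        · rintro ⟨hnd, hball, hlen⟩
          exact ⟨hnd, fun x hx => hball x (List.mem_cons_of_mem _ hx), by simp at hlen ⊢; omega⟩

-- B's comparison characterised: for a list of the right length, sorted(tour) == range(n)
-- iff tour is duplicate-free with every element in [0, n).
theorem sorted_eq_range_iff (tour : List Int) (n : Int) (hlen : (tour.length : Int) = n) :
    (PySem.List.sorted tour (fun x => x) false = PySem.List.pyRange 0 n 1) ↔
      (tour.Nodup ∧ ∀ c ∈ tour, 0 ≤ c ∧ c < n) := by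
  constructor
  · intro h
    have hperm : tour.Perm (PySem.List.pyRange 0 n 1) := by
      have hp := PySem.List.sorted_perm tour (fun x => x) false
      rw [h] at hp
      exact hp.symm
    constructor
    · exact hperm.nodup_iff.mpr (PySem.List.nodup_pyRange_one 0 n)
    · intro c hc
      have hm : c ∈ PySem.List.pyRange 0 n 1 := hperm.mem_iff.mp hc
      have := PySem.List.mem_pyRange_one.mp hm
      omega
  · rintro ⟨hnd, hbound⟩
    have hsub : tour ⊆ PySem.List.pyRange 0 n 1 := by
      intro c hc
      exact PySem.List.mem_pyRange_one.mpr ⟨(hbound c hc).1, (hbound c hc).2⟩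
    have hsp : List.Subperm tour (PySem.List.pyRange 0 n 1) := hnd.subperm hsub
    have hlen2 : (PySem.List.pyRange 0 n 1).length ≤ tour.length := by
      rw [PySem.List.length_pyRange_one]; omega
    have hperm : (PySem.List.pyRange 0 n 1).Perm tour := (hsp.perm_of_length_le hlen2).symm
    exact PySem.List.sorted_eq_of_perm_of_pairwise_lt _ _ _ hperm
      (PySem.List.pairwise_lt_pyRange_one 0 n)

-- ===== VERDICT (by name: the statement is the Claim_ definition above) =====
theorem validate_tour_spec : Claim_equal_validate_tour := by
  intro tour n _
  unfold Spec_validate_tour validate_tour validate_tour_alt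
  by_cases h0 : tour = []
  · simp [h0]
  · simp only [h0, if_false]
    by_cases hlen : (tour.length : Int) ≠ n
    · simp [hlen]
    · rw [not_not] at hlen
      simp only [hlen, ne_eq, not_true_eq_false, if_false]
      have hA := vtLoop_true_iff n tour ([] : List Int) (by simp)
      have hB := sorted_eq_range_iff tour n hlen
      simp only [List.nil_append, List.length_nil, Nat.cast_zero, zero_add] at hA
      refine Bool.eq_iff_iff.mpr ?_
      change vtLoop n [] tour = true ↔ _
      rw [hA, decide_eq_true_eq, hB]
      exact ⟨fun ⟨a, b, _⟩ => ⟨a, b⟩, fun ⟨a, b⟩ => ⟨a, b, hlen⟩⟩
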